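-- pv_equiv track=rewrite | github.com/sitthikornyee-design/monitoring | services/project_service.py | calculate_project_status
-- ===== SOURCE A (Python) =====
-- def calculate_project_status(actions):
--     if not actions:
--         return "Not Started"
--
--     statuses = [action.get("action_status", "Not Started") for action in actions]
--
--     if all(status == "Completed" for status in statuses):
--         return "Completed"
--     if all(status == "Cancelled" for status in statuses):
--         return "Cancelled"
--     if any(action.get("is_overdue") for action in actions):
--         return "At Risk"
--     if any(status in {"In Progress", "Pending"} for status in statuses):
--         return "In Progress"
--     return "Not Started"
-- ===== SOURCE B (Python) =====
-- def calculate_project_status(actions):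
--     n = 0
--     all_completed = True
--     all_cancelled = True
--     any_overdue = False
--     any_active = False
--     for action in actions:
--         n += 1
--         st = action.get("action_status", "Not Started")
--         if st != "Completed":
--             all_completed = False
--         if st != "Cancelled":
--             all_cancelled = False
--         if action.get("is_overdue"):
--             any_overdue = True
--         if st == "In Progress" or st == "Pending":
--             any_active = True
--     if n == 0:
--         return "Not Started"
--     if all_completed:
--         return "Completed"
--     if all_cancelled:
--         return "Cancelled"
--     if any_overdue:
--         return "At Risk"
--     if any_active:
--         return "In Progress"
--     return "Not Started"
-- ===== Notes on version B (the rewrite author's own statement) =====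
-- stated objective: alternative
-- what changed: Replaces the list comprehension plus four separate all/any scans with a single loop over the actions maintaining a count and four boolean flags, decided after the loop in the same priority order.
import Mathlib
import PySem

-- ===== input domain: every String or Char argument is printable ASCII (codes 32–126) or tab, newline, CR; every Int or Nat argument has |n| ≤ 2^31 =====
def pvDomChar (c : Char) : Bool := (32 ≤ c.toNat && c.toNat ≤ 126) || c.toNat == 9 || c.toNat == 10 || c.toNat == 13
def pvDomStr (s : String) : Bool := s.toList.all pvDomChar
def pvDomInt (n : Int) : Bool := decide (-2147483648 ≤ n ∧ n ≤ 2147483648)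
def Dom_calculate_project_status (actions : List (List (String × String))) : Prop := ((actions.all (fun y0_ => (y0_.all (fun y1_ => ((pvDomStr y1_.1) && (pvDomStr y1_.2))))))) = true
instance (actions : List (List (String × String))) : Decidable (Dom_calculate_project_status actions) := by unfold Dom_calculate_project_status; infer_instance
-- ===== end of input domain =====

-- B replaces A's list comprehension plus four all/any scans with one loop keeping a count and four flags (objective: alternative decomposition, same O(n) cost).

-- shared primitive: Python dict.get on an association list (first match)
def pvGet? (a : List (String × String)) (k : String) : Option String :=
  (a.find? (fun p => p.1 == k)).map (fun p => p.2)

def pvGetD (a : List (String × String)) (k d : String) : String :=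
  match pvGet? a k with
  | some v => v
  | none => d

-- truthiness of dict.get(...) with no default: None and "" are falsy
def pvTruthy (o : Option String) : Bool :=
  match o with
  | some s => !(s == "")
  | none => false

-- ===== PORT A =====
def calculate_project_status (actions : List (List (String × String))) : String :=
  if actions = [] then "Not Started"
  else
    let statuses := actions.map (fun a => pvGetD a "action_status" "Not Started")
    if statuses.all (fun s => s == "Completed") then "Completed"
    else if statuses.all (fun s => s == "Cancelled") then "Cancelled"
    else if actions.any (fun a => pvTruthy (pvGet? a "is_overdue")) then "At Risk"
    else if statuses.any (fun s => s == "In Progress" || s == "Pending") then "In Progress"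
    else "Not Started"

-- ===== PORT B =====
def pvStepB (st : Int × Bool × Bool × Bool × Bool) (action : List (String × String)) :
    Int × Bool × Bool × Bool × Bool :=
  let s := pvGetD action "action_status" "Not Started"
  ( st.1 + 1,
    if !(s == "Completed") then false else st.2.1,
    if !(s == "Cancelled") then false else st.2.2.1,
    if pvTruthy (pvGet? action "is_overdue") then true else st.2.2.2.1,
    if s == "In Progress" || s == "Pending" then true else st.2.2.2.2 )

def calculate_project_status_alt (actions : List (List (String × String))) : String :=
  let r := actions.foldl pvStepB (0, true, true, false, false)
  if r.1 == 0 then "Not Started"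
  else if r.2.1 then "Completed"
  else if r.2.2.1 then "Cancelled"
  else if r.2.2.2.1 then "At Risk"
  else if r.2.2.2.2 then "In Progress"
  else "Not Started"

-- ===== PRECONDITION & SPEC =====
def Spec_calculate_project_status (actions : List (List (String × String))) (out : String) : Prop := out = calculate_project_status_alt actions
instance (actions : List (List (String × String))) (out : String) : Decidable (Spec_calculate_project_status actions out) := by unfold Spec_calculate_project_status; infer_instance

-- ===== CLAIM (what is proved, stated in full; the proofs are below) =====
def Claim_equal_calculate_project_status : Prop := ∀ (actions : List (List (String × String))), Dom_calculate_project_status actions → Spec_calculate_project_status actions (calculate_project_status actions)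

-- ===== LEMMAS AND PROOFS =====

theorem pv_if_not (b ac : Bool) : (if !b then false else ac) = (ac && b) := by
  cases b <;> cases ac <;> rfl

theorem pv_if_or (b ao : Bool) : (if b then true else ao) = (ao || b) := by
  cases b <;> cases ao <;> rfl

theorem pv_foldB (actions : List (List (String × String))) (n : Int) (ac al ao aa : Bool) :
    actions.foldl pvStepB (n, ac, al, ao, aa) =
      (n + actions.length,
       ac && actions.all (fun a => pvGetD a "action_status" "Not Started" == "Completed"),
       al && actions.all (fun a => pvGetD a "action_status" "Not Started" == "Cancelled"),
       ao || actions.any (fun a => pvTruthy (pvGet? a "is_overdue")),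
       aa || actions.any (fun a =>
         pvGetD a "action_status" "Not Started" == "In Progress" ||
         pvGetD a "action_status" "Not Started" == "Pending")) := by
  induction actions generalizing n ac al ao aa with
  | nil => simp
  | cons h t ih =>
    simp only [List.foldl_cons, pvStepB, pv_if_not, pv_if_or, ih,
      List.all_cons, List.any_cons, List.length_cons]
    refine Prod.ext ?_ (Prod.ext ?_ (Prod.ext ?_ (Prod.ext ?_ ?_))) <;> simp
    · omega
    · rw [Bool.and_assoc]
    · rw [Bool.and_assoc]
    · rw [Bool.or_assoc]
    · rw [Bool.or_assoc]

-- ===== VERDICT (by name: the statement is the Claim_ definition above) =====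
theorem calculate_project_status_spec : Claim_equal_calculate_project_status := by
  intro actions _
  unfold Spec_calculate_project_status calculate_project_status calculate_project_status_alt
  rw [pv_foldB]
  cases actions with
  | nil => simp
  | cons h t =>
    have hne : ((0 : Int) + ((h :: t).length : Int) == 0) = false := by
      simp only [List.length_cons]; push_cast; simp; omega
    simp only [hne, List.all_map, List.any_map, Bool.true_and, Bool.false_or]
    simp [Function.comp]
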